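-- pv_equiv track=rewrite | github.com/mhenry4444/Pickem-ATS-League | app.py | has_duplicate_games
-- ===== SOURCE A (Python) =====
-- def has_duplicate_games(selected_picks):
--     games = []
--     for pick in selected_picks:
--         if ' @ ' in pick:
--             parts = pick.split(' @ ')
--             away = parts[0].split(' (')[0].strip()
--             home = parts[1].split(' (')[0].strip()
--             game = f"{away} @ {home}"
--             games.append(game)
--     return len(games) != len(set(games))
-- ===== SOURCE B (Python) =====
-- def _game_key(pick):
--     parts = pick.split(' @ ')
--     away = parts[0].split(' (')[0].strip()
--     home = parts[1].split(' (')[0].strip()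
--     return f"{away} @ {home}"
--
--
-- def has_duplicate_games(selected_picks):
--     keys = sorted(_game_key(p) for p in selected_picks if ' @ ' in p)
--     return any(a == b for a, b in zip(keys, keys[1:]))
-- ===== Notes on version B (the rewrite author's own statement) =====
-- stated objective: alternative
-- what changed: B sorts the parsed game keys and reports a duplicate iff two adjacent keys in the sorted order are equal, instead of A's collect-all-keys list and compare-length-with-set check.
import Mathlib
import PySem

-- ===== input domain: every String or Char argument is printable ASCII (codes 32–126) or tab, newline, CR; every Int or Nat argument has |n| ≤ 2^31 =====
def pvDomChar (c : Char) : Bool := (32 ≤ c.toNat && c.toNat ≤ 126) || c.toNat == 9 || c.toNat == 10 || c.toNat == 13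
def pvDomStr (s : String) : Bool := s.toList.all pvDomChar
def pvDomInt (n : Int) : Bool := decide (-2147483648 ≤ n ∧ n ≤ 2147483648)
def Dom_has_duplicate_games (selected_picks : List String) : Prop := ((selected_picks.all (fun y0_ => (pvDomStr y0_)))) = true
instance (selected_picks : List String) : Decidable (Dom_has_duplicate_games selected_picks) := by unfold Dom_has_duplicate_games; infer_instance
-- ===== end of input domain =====

-- B sorts the parsed game keys and looks for two equal ADJACENT keys in the sorted order,
-- instead of A's collect-all-keys list compared in length with its set.

-- ===== PORT A =====
def has_duplicate_games (selected_picks : List String) : Bool :=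
  let games := selected_picks.foldl (fun games pick =>
    if PySem.Str.isIn " @ " pick then
      let parts := (PySem.Str.split? pick " @ ").getD []
      let away := PySem.Str.strip (PySem.List.pyGetD ((PySem.Str.split? (PySem.List.pyGetD parts 0 "") " (").getD []) 0 "")
      let home := PySem.Str.strip (PySem.List.pyGetD ((PySem.Str.split? (PySem.List.pyGetD parts 1 "") " (").getD []) 0 "")
      games ++ [away ++ " @ " ++ home]
    else games) []
  decide (games.length ≠ (PySem.Set.ofList games).length)

-- ===== PORT B =====
def pvGameKey (pick : String) : String :=
  let parts := (PySem.Str.split? pick " @ ").getD []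
  let away := PySem.Str.strip (PySem.List.pyGetD ((PySem.Str.split? (PySem.List.pyGetD parts 0 "") " (").getD []) 0 "")
  let home := PySem.Str.strip (PySem.List.pyGetD ((PySem.Str.split? (PySem.List.pyGetD parts 1 "") " (").getD []) 0 "")
  away ++ " @ " ++ home

-- any(a == b for a, b in zip(keys, keys[1:])) — adjacent-pair scan
def pvAdjEq : List String → Bool
  | a :: b :: rest => a == b || pvAdjEq (b :: rest)
  | _ => false

def has_duplicate_games_alt (selected_picks : List String) : Bool :=
  let keys := PySem.List.sorted ((selected_picks.filter (fun p => PySem.Str.isIn " @ " p)).map pvGameKey) (fun x => x) false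
  pvAdjEq keys

-- ===== PRECONDITION & SPEC =====
def Spec_has_duplicate_games (selected_picks : List String) (out : Bool) : Prop := out = has_duplicate_games_alt selected_picks
instance (selected_picks : List String) (out : Bool) : Decidable (Spec_has_duplicate_games selected_picks out) := by unfold Spec_has_duplicate_games; infer_instance

-- ===== CLAIM =====
def Claim_equal_has_duplicate_games : Prop := ∀ (selected_picks : List String), Dom_has_duplicate_games selected_picks → Spec_has_duplicate_games selected_picks (has_duplicate_games selected_picks)

-- ===== LEMMAS AND PROOFS =====

def pvKeys (l : List String) : List String :=
  (l.filter (fun pick => PySem.Str.isIn " @ " pick)).map pvGameKey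

theorem pvFoldl_eq_keys (l : List String) (acc : List String) :
    l.foldl (fun games pick =>
      if PySem.Str.isIn " @ " pick then
        let parts := (PySem.Str.split? pick " @ ").getD []
        let away := PySem.Str.strip (PySem.List.pyGetD ((PySem.Str.split? (PySem.List.pyGetD parts 0 "") " (").getD []) 0 "")
        let home := PySem.Str.strip (PySem.List.pyGetD ((PySem.Str.split? (PySem.List.pyGetD parts 1 "") " (").getD []) 0 "")
        games ++ [away ++ " @ " ++ home]
      else games) acc = acc ++ pvKeys l := by
  induction l generalizing acc with
  | nil => simp [pvKeys]
  | cons pick rest ih =>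
    rw [List.foldl_cons]
    by_cases h : PySem.Str.isIn " @ " pick
    · rw [if_pos h, ih]
      have h2 : PySem.Chars.isIn [' ', '@', ' '] pick.toList = true := by simpa using h
      simp [pvKeys, h2, pvGameKey, List.append_assoc]
    · rw [if_neg h, ih]
      have h2 : ¬ PySem.Chars.isIn [' ', '@', ' '] pick.toList = true := by
        intro hc; exact h (by simpa using hc)
      simp [pvKeys, h2]

theorem pvOfList_length_lt (xs : List String) (h : ¬ xs.Nodup) :
    (PySem.Set.ofList xs).length < xs.length := by
  induction xs with
  | nil => simp at h
  | cons x rest ih =>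
    rw [PySem.Set.ofList_cons]
    by_cases hx : x ∈ rest
    · have hmem : x ∈ PySem.Set.ofList rest := (PySem.Set.mem_ofList rest x).2 hx
      have hlt : (PySem.Set.discard (PySem.Set.ofList rest) x).length < (PySem.Set.ofList rest).length := by
        simp only [PySem.Set.discard]
        exact List.length_filter_lt_length_iff_exists.2 ⟨x, hmem, by simp⟩
      have hle := PySem.Set.length_ofList_le rest
      simp only [List.length_cons]
      omega
    · have hrest : ¬ rest.Nodup := by
        intro hn; exact h (List.nodup_cons.2 ⟨hx, hn⟩)
      have hlt := ih hrest
      have hle : (PySem.Set.discard (PySem.Set.ofList rest) x).length ≤ (PySem.Set.ofList rest).length := by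
        simp only [PySem.Set.discard]; exact List.length_filter_le _ _
      simp only [List.length_cons]
      omega

theorem pvLenNe_iff (xs : List String) :
    (xs.length ≠ (PySem.Set.ofList xs).length) ↔ ¬ xs.Nodup := by
  constructor
  · intro hne hn
    exact hne ((congrArg List.length (PySem.Set.ofList_eq_self_of_nodup xs hn)).symm)
  · intro h
    have := pvOfList_length_lt xs h
    omega

-- on a ≤-sorted list, an adjacent equal pair exists iff the list has a duplicate
theorem pvAdjEq_iff (l : List String) (hp : l.Pairwise (· ≤ ·)) :
    pvAdjEq l = true ↔ ¬ l.Nodup := by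
  induction l with
  | nil => simp [pvAdjEq]
  | cons a rest ih =>
    cases rest with
    | nil => simp [pvAdjEq]
    | cons b rest' =>
      have hab : a ≤ b := (List.pairwise_cons.1 hp).1 b (by simp)
      have hp' : (b :: rest').Pairwise (· ≤ ·) := (List.pairwise_cons.1 hp).2
      simp only [pvAdjEq, Bool.or_eq_true, beq_iff_eq]
      constructor
      · rintro (rfl | h)
        · simp
        · intro hn
          exact ((ih hp').1 h) (List.nodup_cons.1 hn).2
      · intro hn
        by_cases hab' : a = b
        · exact Or.inl hab'
        · right
          apply (ih hp').2
          intro hn'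
          apply hn
          refine List.nodup_cons.2 ⟨?_, hn'⟩
          intro hmem
          rcases List.mem_cons.1 hmem with rfl | hmem'
          · exact hab' rfl
          · have hb : b ≤ a := by
              have := (List.pairwise_cons.1 hp').1 a hmem'
              exact this
            exact hab' (le_antisymm hab hb)

-- ===== VERDICT =====
theorem has_duplicate_games_spec : Claim_equal_has_duplicate_games := by
  intro sp _
  unfold Spec_has_duplicate_games has_duplicate_games has_duplicate_games_alt
  rw [pvFoldl_eq_keys]
  simp only [List.nil_append]
  have hk : (List.map pvGameKey (List.filter (fun p => PySem.Str.isIn " @ " p) sp)) = pvKeys sp := rfl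
  rw [hk]
  have hperm : (PySem.List.sorted (pvKeys sp) (fun x => x) false).Perm (pvKeys sp) :=
    PySem.List.sorted_perm _ _ _
  have hpair : (PySem.List.sorted (pvKeys sp) (fun x => x) false).Pairwise (· ≤ ·) := by
    simpa using PySem.List.sorted_pairwise (pvKeys sp) (fun x => x)
  have hnd : (PySem.List.sorted (pvKeys sp) (fun x => x) false).Nodup ↔ (pvKeys sp).Nodup :=
    hperm.nodup_iff
  have hiff := pvAdjEq_iff _ hpair
  cases h : pvAdjEq (PySem.List.sorted (pvKeys sp) (fun x => x) false) with
  | false =>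
    have hnodup : (pvKeys sp).Nodup := by
      by_contra hnn
      have := hiff.2 (fun hn => hnn (hnd.1 hn))
      simp [h] at this
    simp only [decide_eq_false_iff_not, not_not]
    exact ((congrArg List.length (PySem.Set.ofList_eq_self_of_nodup _ hnodup)).symm)
  | true =>
    have hnn : ¬ (pvKeys sp).Nodup := fun hn => (hiff.1 h) (hnd.2 hn)
    simp only [decide_eq_true_iff]
    exact (pvLenNe_iff _).2 hnn
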